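-- pv_equiv track=rewrite | github.com/peppelongo96/python-exercises-by-course | unical/anno15_16/fondInformatica/calendario_perpetuo.py | giorno_primo
-- ===== SOURCE A (Python) =====
-- def anno_bisestile(anno):
--     if anno%100==0 and anno%400!=0:
--         return False
--     elif anno%4==0:
--         return True
--     return False
--
-- def giorno_primo(anno):
--     totale_anni = anno - 1800
--     totale_anni_bisestili = 0
--     for i in range (anno,1800,-1):
--         if anno_bisestile(i)== True:
--             totale_anni_bisestili+=1
--     totale_giorni = totale_anni*365 + totale_anni_bisestili
--     giorno_primo = (totale_giorni)%7
--     giorno_primo = (giorno_primo + 5)%7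
--     return giorno_primo
-- ===== SOURCE B (Python) =====
-- def _leaps(n):
--     # Gregorian leap years y with 1 <= y <= n (for n >= 0); floor-division closed form
--     return n // 4 - n // 100 + n // 400
--
-- def giorno_primo(anno):
--     bis = max(0, _leaps(anno) - _leaps(1800))
--     return ((anno - 1800) * 365 + bis + 5) % 7
-- ===== Notes on version B (the rewrite author's own statement) =====
-- stated objective: faster
-- what changed: Replaced the per-year loop counting leap years from 1801 up to anno with the closed-form leap-year count n//4 - n//100 + n//400 evaluated at the two endpoints.
import Mathlib
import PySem

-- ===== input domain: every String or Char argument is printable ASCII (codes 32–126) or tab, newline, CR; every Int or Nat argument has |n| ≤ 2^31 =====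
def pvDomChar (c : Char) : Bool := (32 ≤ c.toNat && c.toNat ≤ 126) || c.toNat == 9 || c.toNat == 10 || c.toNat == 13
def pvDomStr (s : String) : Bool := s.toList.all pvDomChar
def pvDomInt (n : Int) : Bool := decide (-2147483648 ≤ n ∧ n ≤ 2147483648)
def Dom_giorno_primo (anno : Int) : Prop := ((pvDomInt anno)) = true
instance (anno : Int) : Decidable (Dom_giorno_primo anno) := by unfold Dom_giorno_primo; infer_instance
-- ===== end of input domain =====

-- B replaces A's per-year loop over range(anno, 1800, -1) with the closed-form
-- leap-year count n//4 - n//100 + n//400 at the two endpoints (objective: faster).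

-- ===== PORT A =====
def anno_bisestile (anno : Int) : Bool :=
  if PySem.Int.mod anno 100 == 0 && PySem.Int.mod anno 400 != 0 then false
  else if PySem.Int.mod anno 4 == 0 then true
  else false

def giorno_primo (anno : Int) : Int :=
  let totale_anni := anno - 1800
  let totale_anni_bisestili : Int :=
    (PySem.List.pyRange anno 1800 (-1)).foldl
      (fun acc i => if anno_bisestile i == true then acc + 1 else acc) 0
  let totale_giorni := totale_anni * 365 + totale_anni_bisestili
  let g := PySem.Int.mod totale_giorni 7
  PySem.Int.mod (g + 5) 7

-- ===== PORT B =====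
def pvLeaps (n : Int) : Int :=
  PySem.Int.floordiv n 4 - PySem.Int.floordiv n 100 + PySem.Int.floordiv n 400

def giorno_primo_alt (anno : Int) : Int :=
  let bis := max 0 (pvLeaps anno - pvLeaps 1800)
  PySem.Int.mod ((anno - 1800) * 365 + bis + 5) 7

-- ===== PRECONDITION & SPEC =====
def Spec_giorno_primo (anno : Int) (out : Int) : Prop := out = giorno_primo_alt anno
instance (anno : Int) (out : Int) : Decidable (Spec_giorno_primo anno out) := by unfold Spec_giorno_primo; infer_instance

-- ===== CLAIM (what is proved, stated in full; the proofs are below) =====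
def Claim_equal_giorno_primo : Prop := ∀ (anno : Int), Dom_giorno_primo anno → Spec_giorno_primo anno (giorno_primo anno)

-- ===== LEMMAS AND PROOFS =====

theorem pv_foldl_count (l : List Int) (c : Int) :
    l.foldl (fun acc i => if anno_bisestile i == true then acc + 1 else acc) c
      = c + (l.countP (fun i => anno_bisestile i) : Int) := by
  induction l generalizing c with
  | nil => simp
  | cons a t ih =>
    simp only [List.foldl_cons, List.countP_cons, ih]
    by_cases h : anno_bisestile a = true <;> simp [h] <;> push_cast <;> ring

-- leap test characterised in terms of emod (divisors are positive)
theorem pv_bis_iff (a : Int) :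
    anno_bisestile a = true ↔ (a % 4 = 0 ∧ (a % 100 ≠ 0 ∨ a % 400 = 0)) := by
  have m4 : PySem.Int.mod a 4 = a % 4 := PySem.Int.mod_eq_emod_of_pos (by norm_num)
  have m100 : PySem.Int.mod a 100 = a % 100 := PySem.Int.mod_eq_emod_of_pos (by norm_num)
  have m400 : PySem.Int.mod a 400 = a % 400 := PySem.Int.mod_eq_emod_of_pos (by norm_num)
  simp only [anno_bisestile, m4, m100, m400]
  split_ifs with h1 h2 <;> simp_all <;> omega

-- one step of the closed form: pvLeaps a - pvLeaps (a-1) is 1 exactly on leap years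
theorem pv_step (a : Int) :
    (if anno_bisestile a = true then (1 : Int) else 0) = pvLeaps a - pvLeaps (a - 1) := by
  have e4 : ∀ x : Int, PySem.Int.floordiv x 4 = x / 4 :=
    fun x => PySem.Int.floordiv_eq_ediv_of_pos (by norm_num)
  have e100 : ∀ x : Int, PySem.Int.floordiv x 100 = x / 100 :=
    fun x => PySem.Int.floordiv_eq_ediv_of_pos (by norm_num)
  have e400 : ∀ x : Int, PySem.Int.floordiv x 400 = x / 400 :=
    fun x => PySem.Int.floordiv_eq_ediv_of_pos (by norm_num)
  by_cases h : anno_bisestile a = true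
  · rw [if_pos h]
    rw [pv_bis_iff] at h
    simp only [pvLeaps, e4, e100, e400]
    omega
  · rw [if_neg h]
    rw [pv_bis_iff] at h
    push_neg at h
    simp only [pvLeaps, e4, e100, e400]
    omega

theorem pv_count_range (n : Nat) :
    ((PySem.List.pyRange (1800 + (n : Int)) 1800 (-1)).countP (fun i => anno_bisestile i) : Int)
      = pvLeaps (1800 + (n : Int)) - pvLeaps 1800 := by
  induction n with
  | zero =>
    rw [PySem.List.pyRange_neg_one_eq_nil (by norm_num)]
    simp
  | succ k ih =>
    push_cast
    rw [show (1800 : Int) + ((k : Int) + 1) = 1800 + (k : Int) + 1 from by ring]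
    rw [PySem.List.pyRange_neg_one_cons (by omega)]
    rw [show (1800 : Int) + (k : Int) + 1 - 1 = 1800 + (k : Int) from by ring]
    simp only [List.countP_cons]
    have hstep := pv_step (1800 + (k : Int) + 1)
    rw [show (1800 + (k : Int) + 1) - 1 = 1800 + (k : Int) from by ring] at hstep
    by_cases h : anno_bisestile (1800 + (k : Int) + 1) = true <;>
      simp only [h, if_true, if_false, Bool.false_eq_true] at hstep ih ⊢ <;>
      push_cast <;> omega

theorem pv_leaps_le (anno : Int) (h : anno ≤ 1800) : pvLeaps anno ≤ pvLeaps 1800 := by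
  simp only [pvLeaps, PySem.Int.floordiv_eq_ediv_of_pos (show (0:Int) < 4 by norm_num),
    PySem.Int.floordiv_eq_ediv_of_pos (show (0:Int) < 100 by norm_num),
    PySem.Int.floordiv_eq_ediv_of_pos (show (0:Int) < 400 by norm_num)]
  omega

-- ===== VERDICT (by name: the statement is the Claim_ definition above) =====
theorem giorno_primo_spec : Claim_equal_giorno_primo := by
  intro anno _
  unfold Spec_giorno_primo giorno_primo giorno_primo_alt
  have hm7 : ∀ x : Int, PySem.Int.mod x 7 = x % 7 :=
    fun x => PySem.Int.mod_eq_emod_of_pos (by norm_num)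
  simp only [hm7, pv_foldl_count]
  have hcnt : ((PySem.List.pyRange anno 1800 (-1)).countP (fun i => anno_bisestile i) : Int)
      = max 0 (pvLeaps anno - pvLeaps 1800) := by
    by_cases h : anno ≤ 1800
    · rw [PySem.List.pyRange_neg_one_eq_nil h]
      have := pv_leaps_le anno h
      simp; omega
    · obtain ⟨n, hn⟩ : ∃ n : Nat, anno = 1800 + (n : Int) :=
        ⟨(anno - 1800).toNat, by omega⟩
      subst hn
      rw [pv_count_range]
      have : pvLeaps 1800 ≤ pvLeaps (1800 + (n : Int)) := by
        simp only [pvLeaps, PySem.Int.floordiv_eq_ediv_of_pos (show (0:Int) < 4 by norm_num),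
          PySem.Int.floordiv_eq_ediv_of_pos (show (0:Int) < 100 by norm_num),
          PySem.Int.floordiv_eq_ediv_of_pos (show (0:Int) < 400 by norm_num)]
        omega
      omega
  rw [hcnt]
  omega
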